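-- pv_equiv track=rewrite | github.com/rkothari3/Autonomous-Navigation-System | Lab01/ir_sensors.py | findClosestSensor
-- ===== SOURCE A (Python) =====
-- def findClosestSensor(readings):
--     # Intialize variables
--     max_readings = -1 # Can be any value as long as it is less than 20
--     sensor_index = -1 # -1 b/c if there no reading is found, function is supposed to return -1. So, the default value is 1.
--     for i in range(len(readings)):
--         if readings[i] >= 20: # readings must be atleast 20 to be considered.
--             # if number at i index greater than the current max reading, it is the new max reading.
--             if readings[i] > max_readings:
--                 max_readings = readings[i]
--                 sensor_index = i
--     return sensor_index
-- ===== SOURCE B (Python) =====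
-- def findClosestSensor(readings):
--     qualifying = [r for r in readings if r >= 20]
--     if not qualifying:
--         return -1
--     return readings.index(max(qualifying))
-- ===== Notes on version B (the rewrite author's own statement) =====
-- stated objective: simpler
-- what changed: Replaces A's single fused max-and-index tracking loop over range(len(readings)) with three declarative passes: filter the qualifying readings (>= 20), take their max, and locate its first occurrence with list.index; ties and the -1 default are preserved.
import Mathlib
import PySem

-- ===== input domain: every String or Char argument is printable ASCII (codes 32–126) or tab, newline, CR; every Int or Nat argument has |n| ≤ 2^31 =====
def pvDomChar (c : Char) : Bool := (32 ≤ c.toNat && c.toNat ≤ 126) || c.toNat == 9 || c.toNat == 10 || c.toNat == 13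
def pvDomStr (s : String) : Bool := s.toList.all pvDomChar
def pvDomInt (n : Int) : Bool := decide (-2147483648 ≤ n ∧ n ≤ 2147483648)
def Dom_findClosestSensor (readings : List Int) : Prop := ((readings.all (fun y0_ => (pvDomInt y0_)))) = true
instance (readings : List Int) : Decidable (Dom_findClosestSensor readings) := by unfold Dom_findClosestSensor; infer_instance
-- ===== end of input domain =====

-- B replaces A's fused max-tracking index loop by filter / max / first-index passes (objective: simpler).

-- ===== PORT A =====
-- fused scan: for i in range(len(readings)): track (max_readings, sensor_index)
def findClosestSensor (readings : List Int) : Int :=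
  ((PySem.List.pyRange 0 (PySem.List.len readings) 1).foldl
    (fun (s : Int × Int) i =>
      if PySem.List.pyGetD readings i 0 ≥ 20 then
        if PySem.List.pyGetD readings i 0 > s.1 then (PySem.List.pyGetD readings i 0, i) else s
      else s)
    (-1, -1)).2

-- ===== PORT B =====
-- qualifying = [r for r in readings if r >= 20]; if empty → -1; else readings.index(max(qualifying))
def findClosestSensor_alt (readings : List Int) : Int :=
  let qualifying := readings.filter (fun r => 20 ≤ r)
  if qualifying = [] then -1
  else
    match PySem.List.max? qualifying (fun x => x) with
    | none => -1                      -- unreachable: qualifying ≠ []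
    | some m => ((PySem.List.index? readings m).getD 0 : Nat)  -- index cannot miss: m ∈ readings

-- ===== PRECONDITION & SPEC =====
def Spec_findClosestSensor (readings : List Int) (out : Int) : Prop := out = findClosestSensor_alt readings
instance (readings : List Int) (out : Int) : Decidable (Spec_findClosestSensor readings out) := by unfold Spec_findClosestSensor; infer_instance

-- ===== CLAIM (what is proved, stated in full; the proofs are below) =====
def Claim_equal_findClosestSensor : Prop := ∀ (readings : List Int), Dom_findClosestSensor readings → Spec_findClosestSensor readings (findClosestSensor readings)

-- ===== LEMMAS AND PROOFS =====

-- the full state of A's loop, as a fold over (index, value) pairs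
def pvAState (readings : List Int) : Int × Int :=
  (PySem.List.enumerate readings 0).foldl
    (fun (s : Int × Int) p =>
      if p.2 ≥ 20 then (if p.2 > s.1 then (p.2, p.1) else s) else s)
    (-1, -1)

-- B's result, with the max written as the running fold (max?_id_cons)
def pvBState (readings : List Int) : Int × Int :=
  match readings.filter (fun r => 20 ≤ r) with
  | [] => (-1, -1)
  | qh :: qt => (qt.foldl max qh, ((PySem.List.index? readings (qt.foldl max qh)).getD 0 : Nat))

theorem pvA_eq_state (readings : List Int) : findClosestSensor readings = (pvAState readings).2 := by
  unfold findClosestSensor pvAState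
  rw [PySem.List.enumerate_eq_map_pyRange (d := 0), List.foldl_map]

theorem pvMax_mem (qh : Int) (qt : List Int) : qt.foldl max qh ∈ qh :: qt := by
  have h := PySem.List.max?_mem (xs := qh :: qt) (key := fun x => x) (m := qt.foldl max qh)
  exact h (PySem.List.max?_id_cons qh qt)

theorem pvMax_isMax (qh : Int) (qt : List Int) : ∀ y ∈ qh :: qt, y ≤ qt.foldl max qh := by
  intro y hy
  exact PySem.List.max?_isMax (PySem.List.max?_id_cons qh qt) y hy

theorem pvFoldMax_append (qh : Int) (qt : List Int) (x : Int) :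
    (qt ++ [x]).foldl max qh = max (qt.foldl max qh) x := by
  rw [List.foldl_append]; rfl

theorem pvBState_nil {xs : List Int} (h : xs.filter (fun r => 20 ≤ r) = []) :
    pvBState xs = (-1, -1) := by
  unfold pvBState; rw [h]

theorem pvBState_cons {xs : List Int} {qh : Int} {qt : List Int}
    (h : xs.filter (fun r => 20 ≤ r) = qh :: qt) :
    pvBState xs = (qt.foldl max qh, (((PySem.List.index? xs (qt.foldl max qh)).getD 0 : Nat) : Int)) := by
  unfold pvBState; rw [h]

theorem pvState_eq (readings : List Int) : pvAState readings = pvBState readings := by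
  induction readings using List.reverseRecOn with
  | nil => rfl
  | append_singleton xs x ih =>
    unfold pvAState at ih ⊢
    rw [PySem.List.enumerate_append, List.foldl_append, ih]
    by_cases hx : 20 ≤ x
    · have hfx : (xs ++ [x]).filter (fun r => 20 ≤ r) = xs.filter (fun r => 20 ≤ r) ++ [x] := by
        simp [List.filter_append, hx]
      cases hq : xs.filter (fun r => decide (20 ≤ r)) with
      | nil =>
        -- no qualifying reading in xs; x is the first: state becomes (x, len xs)
        have hxnot : x ∉ xs := by
          intro hmem
          have : x ∈ xs.filter (fun r => decide (20 ≤ r)) := by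
            simp [List.mem_filter, hmem, hx]
          rw [hq] at this; simp at this
        rw [pvBState_nil hq, pvBState_cons (by rw [hfx, hq]; rfl)]
        simp only [PySem.List.enumerate, List.foldl]
        have h20 : x ≥ 20 := hx
        simp only [ge_iff_le, h20, if_pos, show (-1 : Int) < x by omega, if_pos]
        rw [PySem.List.index?_append_singleton_self xs x hxnot]
        simp
      | cons qh qt =>
        set M := qt.foldl max qh with hM
        have hMmemq : M ∈ qh :: qt := pvMax_mem qh qt
        have hMmem : M ∈ xs := by
          have : M ∈ xs.filter (fun r => decide (20 ≤ r)) := hq ▸ hMmemq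
          exact (List.mem_filter.mp this).1
        have hMax : ∀ y ∈ qh :: qt, y ≤ M := pvMax_isMax qh qt
        rw [pvBState_cons hq]
        have hfx2 : (xs ++ [x]).filter (fun r => decide (20 ≤ r)) = qh :: (qt ++ [x]) := by
          rw [hfx, hq]; rfl
        rw [pvBState_cons hfx2, pvFoldMax_append, ← hM]
        simp only [PySem.List.enumerate, List.foldl]
        by_cases hgt : x > M
        · -- new maximum at the end
          have hxnot : x ∉ xs := by
            intro hmem
            have : x ∈ qh :: qt := by
              rw [← hq]; simp [List.mem_filter, hmem, hx]
            have := hMax x this; omega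
          simp only [ge_iff_le, hx, if_pos, gt_iff_lt, hgt, if_pos]
          rw [max_eq_right (le_of_lt hgt)]
          rw [PySem.List.index?_append_singleton_self xs x hxnot]
          simp
        · -- x does not beat the running maximum
          simp only [ge_iff_le, hx, if_pos, gt_iff_lt, if_neg hgt]
          rw [max_eq_left (by omega)]
          rw [PySem.List.index?_append_of_mem _ hMmem]
    · -- x < 20: nothing changes
      have hfx : (xs ++ [x]).filter (fun r => decide (20 ≤ r)) = xs.filter (fun r => decide (20 ≤ r)) := by
        simp [List.filter_append, hx]
      simp only [PySem.List.enumerate, List.foldl]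
      rw [if_neg (by omega : ¬ x ≥ 20)]
      cases hq : xs.filter (fun r => decide (20 ≤ r)) with
      | nil => rw [pvBState_nil hq, pvBState_nil (by rw [hfx, hq])]
      | cons qh qt =>
        have hMmem : qt.foldl max qh ∈ xs := by
          have : qt.foldl max qh ∈ xs.filter (fun r => decide (20 ≤ r)) := hq ▸ pvMax_mem qh qt
          exact (List.mem_filter.mp this).1
        rw [pvBState_cons hq, pvBState_cons (by rw [hfx, hq])]
        rw [PySem.List.index?_append_of_mem _ hMmem]

theorem pvB_eq_state (readings : List Int) : findClosestSensor_alt readings = (pvBState readings).2 := by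
  unfold findClosestSensor_alt pvBState
  cases hq : readings.filter (fun r => 20 ≤ r) with
  | nil => simp
  | cons qh qt =>
    simp only [if_neg (List.cons_ne_nil qh qt), PySem.List.max?_id_cons]

-- ===== VERDICT (by name: the statement is the Claim_ definition above) =====
theorem findClosestSensor_spec : Claim_equal_findClosestSensor := by
  intro readings _
  unfold Spec_findClosestSensor
  rw [pvA_eq_state, pvState_eq, pvB_eq_state]
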